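-- pv_equiv track=rewrite | github.com/zhangyong78/qqokx | okx_quant/persistence.py | _normalize_position_note_text
-- ===== SOURCE A (Python) =====
-- def _normalize_position_note_text(value: object) -> str:
--     if value is None:
--         return ""
--     lines = str(value).replace("\r\n", "\n").replace("\r", "\n").split("\n")
--     while lines and not lines[0].strip():
--         lines.pop(0)
--     while lines and not lines[-1].strip():
--         lines.pop()
--     return "\n".join(line.rstrip() for line in lines)
-- ===== SOURCE B (Python) =====
-- def _normalize_position_note_text(value: object) -> str:
--     if value is None:
--         return ""
--     text = str(value).replace("\r\n", "\n").replace("\r", "\n")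
--     return "\n".join(line.rstrip() for line in text.split("\n")).strip("\n")
-- ===== Notes on version B (the rewrite author's own statement) =====
-- stated objective: simpler
-- what changed: Replaces A's two while/pop loops that trim blank boundary lines with a single strip of newline characters applied after every line is right-stripped and rejoined, since whitespace-only lines right-strip to empty strings and the join then exposes them as leading/trailing newlines.
import Mathlib
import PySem

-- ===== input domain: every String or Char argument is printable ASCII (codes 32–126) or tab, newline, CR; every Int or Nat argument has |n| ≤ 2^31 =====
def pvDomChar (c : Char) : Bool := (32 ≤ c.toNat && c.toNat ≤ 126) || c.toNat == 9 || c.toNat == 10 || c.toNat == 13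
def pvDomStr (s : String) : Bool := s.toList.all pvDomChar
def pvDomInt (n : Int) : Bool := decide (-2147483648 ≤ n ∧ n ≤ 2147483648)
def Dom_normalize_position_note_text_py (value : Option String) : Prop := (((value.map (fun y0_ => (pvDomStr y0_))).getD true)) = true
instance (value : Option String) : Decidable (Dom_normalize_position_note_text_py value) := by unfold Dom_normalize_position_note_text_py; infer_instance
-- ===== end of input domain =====

-- B replaces A's two while/pop loops trimming blank boundary lines with one strip('\n')
-- applied after every line is right-stripped and rejoined (objective: simpler).

-- ===== PORT A =====
-- `while lines and not lines[0].strip(): lines.pop(0)` — drop leading whitespace-only lines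
def pvDropLeadingBlank (lines : List (List Char)) : List (List Char) :=
  List.dropWhile (fun l => (PySem.Chars.strip l).isEmpty) lines

-- `while lines and not lines[-1].strip(): lines.pop()` — the same loop from the end
def pvDropTrailingBlank (lines : List (List Char)) : List (List Char) :=
  (List.dropWhile (fun l => (PySem.Chars.strip l).isEmpty) lines.reverse).reverse

def normalize_position_note_text_py (value : Option String) : String :=
  match value with
  | none => ""
  | some v =>
    let text := PySem.Chars.replace (PySem.Chars.replace v.toList ['\r', '\n'] ['\n']) ['\r'] ['\n']
    let lines := PySem.Chars.splitOn text ['\n']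
    let lines := pvDropLeadingBlank lines
    let lines := pvDropTrailingBlank lines
    String.ofList (PySem.Chars.join ['\n'] (lines.map PySem.Chars.rstrip))

-- ===== PORT B =====
def normalize_position_note_text_py_alt (value : Option String) : String :=
  match value with
  | none => ""
  | some v =>
    let text := PySem.Chars.replace (PySem.Chars.replace v.toList ['\r', '\n'] ['\n']) ['\r'] ['\n']
    String.ofList (PySem.Chars.stripChars
      (PySem.Chars.join ['\n'] ((PySem.Chars.splitOn text ['\n']).map PySem.Chars.rstrip)) ['\n'])

-- ===== PRECONDITION & SPEC =====
def Spec_normalize_position_note_text_py (value : Option String) (out : String) : Prop := out = normalize_position_note_text_py_alt value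
instance (value : Option String) (out : String) : Decidable (Spec_normalize_position_note_text_py value out) := by unfold Spec_normalize_position_note_text_py; infer_instance

-- ===== CLAIM (what is proved, stated in full; the proofs are below) =====
def Claim_equal_normalize_position_note_text_py : Prop := ∀ (value : Option String), Dom_normalize_position_note_text_py value → Spec_normalize_position_note_text_py value (normalize_position_note_text_py value)

-- ===== LEMMAS AND PROOFS =====


theorem pv_rstrip_nil_iff (l : List Char) :
    PySem.Chars.rstrip l = [] ↔ ∀ c ∈ l, PySem.Chars.isspace c := by
  simp [PySem.Chars.rstrip, List.dropWhile_eq_nil_iff]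

theorem pv_strip_nil_iff (l : List Char) :
    PySem.Chars.strip l = [] ↔ ∀ c ∈ l, PySem.Chars.isspace c := by
  simp only [PySem.Chars.strip, pv_rstrip_nil_iff, PySem.Chars.lstrip]
  constructor
  · intro h c hc
    by_cases hall : ∀ x ∈ l, PySem.Chars.isspace x
    · exact hall c hc
    · exfalso
      have hne : List.dropWhile PySem.Chars.isspace l ≠ [] := by
        simpa [List.dropWhile_eq_nil_iff] using hall
      obtain ⟨x, xs, hx⟩ := List.exists_cons_of_ne_nil hne
      have hhead : PySem.Chars.isspace x = false := by
        have := List.head?_dropWhile_not PySem.Chars.isspace l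
        rw [hx] at this; simpa using this
      have : PySem.Chars.isspace x := h x (by rw [hx]; simp)
      simp [hhead] at this
  · intro h c hc
    exact h c (List.dropWhile_sublist _ |>.mem hc)

theorem pv_strip_empty_iff (l : List Char) :
    (PySem.Chars.strip l).isEmpty = (PySem.Chars.rstrip l).isEmpty := by
  rw [Bool.eq_iff_iff]
  simp [List.isEmpty_iff, pv_strip_nil_iff, pv_rstrip_nil_iff]


theorem pv_rstrip_nl_free (l : List Char) (h : '\n' ∉ l) : '\n' ∉ PySem.Chars.rstrip l := by
  intro hm
  exact h (by simpa using (List.dropWhile_sublist _ (l := l.reverse)).mem (by simpa [PySem.Chars.rstrip] using hm))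

theorem pv_intercalate_append_single (a : List Char) (X : List (List Char)) (y : List Char)
    (hX : X ≠ []) :
    List.intercalate a (X ++ [y]) = List.intercalate a X ++ a ++ y := by
  induction X with
  | nil => simp at hX
  | cons x xs ih =>
    cases xs with
    | nil => simp [List.intercalate, List.intersperse]
    | cons b bs =>
      have h1 : List.intercalate a (x :: b :: bs ++ [y]) = x ++ a ++ List.intercalate a (b :: bs ++ [y]) := by
        simp [List.intercalate, List.intersperse]
      have h2 : List.intercalate a (x :: b :: bs) = x ++ a ++ List.intercalate a (b :: bs) := by
        simp [List.intercalate, List.intersperse]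
      simp only [List.cons_append] at h1 ⊢
      rw [h1, h2]
      have := ih (by simp)
      simp only [List.cons_append] at this
      rw [this]
      simp

theorem pv_reverse_intercalate (a : Char) (P : List (List Char)) :
    (List.intercalate [a] P).reverse = List.intercalate [a] ((P.map List.reverse).reverse) := by
  induction P with
  | nil => simp [List.intercalate]
  | cons x xs ih =>
    cases xs with
    | nil => simp [List.intercalate, List.intersperse]
    | cons b bs =>
      have h2 : List.intercalate [a] (x :: b :: bs) = x ++ [a] ++ List.intercalate [a] (b :: bs) := by
        simp [List.intercalate, List.intersperse]
      rw [h2]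
      simp only [List.map_cons, List.reverse_cons]
      rw [pv_intercalate_append_single _ _ _ (by simp)]
      simp [ih]


theorem pv_dropWhile_nl_intercalate (P : List (List Char)) (h : ∀ l ∈ P, '\n' ∉ l) :
    List.dropWhile (fun c => (['\n'] : List Char).contains c) (List.intercalate ['\n'] P)
      = List.intercalate ['\n'] (List.dropWhile List.isEmpty P) := by
  induction P with
  | nil => simp [List.intercalate]
  | cons x xs ih =>
    cases xs with
    | nil =>
      cases x with
      | nil => simp [List.intercalate]
      | cons c cs =>
        have hne : ¬ '\n' = c ∧ '\n' ∉ cs := by simpa using h (c :: cs) (by simp)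
        have hc : decide (c = '\n') = false := by
          simp only [decide_eq_false_iff_not]
          exact fun e => hne.1 e.symm
        simp [List.intercalate, List.intersperse, List.dropWhile, hc]
    | cons b bs =>
      have h2 : List.intercalate ['\n'] (x :: b :: bs) = x ++ ['\n'] ++ List.intercalate ['\n'] (b :: bs) := by
        simp [List.intercalate, List.intersperse]
      rw [h2]
      cases x with
      | nil =>
        simp only [List.nil_append, List.cons_append, List.dropWhile, List.contains_cons,
          BEq.rfl, Bool.true_or]
        have := ih (fun l hl => h l (by simp [hl]))
        simpa [List.dropWhile] using this
      | cons c cs =>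
        have hne : ¬ '\n' = c ∧ '\n' ∉ cs := by simpa using h (c :: cs) (by simp)
        have hc : decide (c = '\n') = false := by
          simp only [decide_eq_false_iff_not]
          exact fun e => hne.1 e.symm
        simp [List.dropWhile, hc, List.intercalate]


theorem pv_go_nl_free (fuel : Nat) :
    ∀ (l cur : List Char) (acc : List (List Char)),
      l.length < fuel → '\n' ∉ cur → (∀ x ∈ acc, '\n' ∉ x) →
      ∀ x ∈ PySem.Chars.splitOn.go ['\n'] fuel l cur acc, '\n' ∉ x := by
  induction fuel with
  | zero => intro l cur acc h; omega
  | succ fuel ih =>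
    intro l cur acc hlen hcur hacc x hx
    cases l with
    | nil =>
      rw [PySem.Chars.splitOn.go] at hx
      · simp at hx
        rcases hx with h1 | h2
        · exact hacc x h1
        · subst h2; simpa using hcur
      · omega
    | cons c rest =>
      rw [PySem.Chars.splitOn.go] at hx
      by_cases hc : c = '\n'
      · subst hc
        have hpre : (['\n'] : List Char).isPrefixOf ('\n' :: rest) = true := by
          simp [List.isPrefixOf]
        rw [if_pos hpre] at hx
        refine ih _ _ _ (by simp at hlen ⊢; omega) (by simp) ?_ x hx
        intro y hy
        simp at hy
        rcases hy with h1 | h2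
        · subst h1; simpa using hcur
        · exact hacc y h2
      · have hpre : (['\n'] : List Char).isPrefixOf (c :: rest) = false := by
          simp [List.isPrefixOf]
          exact fun e => hc e.symm
        rw [if_neg (by simp [hpre])] at hx
        refine ih _ _ _ (by simp at hlen ⊢; omega) ?_ hacc x hx
        simp [hcur]
        exact fun e => hc e.symm

theorem pv_splitOn_nl_free (s : List Char) :
    ∀ x ∈ PySem.Chars.splitOn s ['\n'], '\n' ∉ x := by
  intro x hx
  exact pv_go_nl_free (s.length + 1) s [] [] (by omega) (by simp) (by simp) x
    (by simpa [PySem.Chars.splitOn] using hx)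

theorem pv_main (L : List (List Char)) (hL : ∀ l ∈ L, '\n' ∉ l) :
    PySem.Chars.stripChars (PySem.Chars.join ['\n'] (L.map PySem.Chars.rstrip)) ['\n']
      = PySem.Chars.join ['\n'] ((pvDropTrailingBlank (pvDropLeadingBlank L)).map PySem.Chars.rstrip) := by
  have hpred : (fun l => (PySem.Chars.strip l).isEmpty) = (List.isEmpty ∘ PySem.Chars.rstrip) :=
    funext fun l => pv_strip_empty_iff l
  have hrev : (List.isEmpty ∘ List.reverse) = (List.isEmpty : List Char → Bool) := by
    funext l; simp
  set X := pvDropLeadingBlank L with hX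
  set M := X.map PySem.Chars.rstrip with hM
  have hMfree : ∀ l ∈ M, '\n' ∉ l := by
    intro l hl
    simp only [hM, List.mem_map] at hl
    obtain ⟨y, hy, rfl⟩ := hl
    exact pv_rstrip_nl_free y (hL y ((List.dropWhile_sublist _).mem hy))
  -- step 1: left strip
  have step1 : List.dropWhile (fun c => (['\n'] : List Char).contains c)
      (List.intercalate ['\n'] (L.map PySem.Chars.rstrip)) = List.intercalate ['\n'] M := by
    rw [pv_dropWhile_nl_intercalate _ (by
      intro l hl
      simp only [List.mem_map] at hl
      obtain ⟨y, hy, rfl⟩ := hl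
      exact pv_rstrip_nl_free y (hL y hy))]
    rw [List.dropWhile_map, hM, hX, pvDropLeadingBlank, hpred]
  -- step 2-5: right strip
  have hrevfree : ∀ l ∈ (M.map List.reverse).reverse, '\n' ∉ l := by
    intro l hl
    simp only [List.mem_reverse, List.mem_map] at hl
    obtain ⟨y, hy, rfl⟩ := hl
    simpa using hMfree y hy
  set Y := List.dropWhile List.isEmpty M.reverse with hY
  have step2 : List.dropWhile (fun c => (['\n'] : List Char).contains c)
      (List.intercalate ['\n'] M).reverse = List.intercalate ['\n'] (Y.map List.reverse) := by
    rw [pv_reverse_intercalate, pv_dropWhile_nl_intercalate _ hrevfree]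
    congr 1
    rw [show (M.map List.reverse).reverse = M.reverse.map List.reverse by simp]
    rw [List.dropWhile_map, hrev]
  have rhs : (pvDropTrailingBlank X).map PySem.Chars.rstrip = Y.reverse := by
    rw [pvDropTrailingBlank, hpred, hY]
    rw [show (List.dropWhile (List.isEmpty ∘ PySem.Chars.rstrip) X.reverse).reverse.map PySem.Chars.rstrip
        = ((List.dropWhile (List.isEmpty ∘ PySem.Chars.rstrip) X.reverse).map PySem.Chars.rstrip).reverse by simp]
    rw [← List.dropWhile_map]
    congr 1
    simp [hM]
  rw [PySem.Chars.stripChars, PySem.Chars.join, rhs]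
  rw [step1, step2, pv_reverse_intercalate]
  congr 1
  simp

-- ===== VERDICT (by name: the statement is the Claim_ definition above) =====
theorem normalize_position_note_text_py_spec : Claim_equal_normalize_position_note_text_py := by
  intro value _
  unfold Spec_normalize_position_note_text_py
  cases value with
  | none => rfl
  | some v =>
    show normalize_position_note_text_py (some v) = normalize_position_note_text_py_alt (some v)
    unfold normalize_position_note_text_py normalize_position_note_text_py_alt
    exact congrArg String.ofList (pv_main _ (pv_splitOn_nl_free _)).symm
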